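-- pv_equiv track=rewrite | github.com/dhalteh/divine_comedy | src/word_model.py | create_tokenized_sequences
-- ===== SOURCE A (Python) =====
-- def create_tokenized_sequences(cleaned_lines, word_index_dict):
--     tokenized_sequences = []
--     for line in cleaned_lines:
--         line_to_tokens = [word_index_dict[word] for word in line.split(' ')]
--         num_tokens = len(line_to_tokens)
--         for n in range(1, num_tokens):
--             n_grams = line_to_tokens[:n + 1]
--             tokenized_sequences.append(n_grams)
--     return tokenized_sequences
-- ===== SOURCE B (Python) =====
-- def create_tokenized_sequences(cleaned_lines, word_index_dict):
--     tokenized_sequences = []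
--     for line in cleaned_lines:
--         tokens = [word_index_dict[word] for word in line.split(' ')]
--         prefix = tokens[:1]
--         for t in tokens[1:]:
--             prefix.append(t)
--             tokenized_sequences.append(list(prefix))
--     return tokenized_sequences
-- ===== Notes on version B (the rewrite author's own statement) =====
-- stated objective: alternative
-- what changed: Replaces the per-n slicing tokens[:n+1] with a single incremental pass per line that grows one prefix accumulator and appends a copy of it after each token beyond the first.
import Mathlib
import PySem

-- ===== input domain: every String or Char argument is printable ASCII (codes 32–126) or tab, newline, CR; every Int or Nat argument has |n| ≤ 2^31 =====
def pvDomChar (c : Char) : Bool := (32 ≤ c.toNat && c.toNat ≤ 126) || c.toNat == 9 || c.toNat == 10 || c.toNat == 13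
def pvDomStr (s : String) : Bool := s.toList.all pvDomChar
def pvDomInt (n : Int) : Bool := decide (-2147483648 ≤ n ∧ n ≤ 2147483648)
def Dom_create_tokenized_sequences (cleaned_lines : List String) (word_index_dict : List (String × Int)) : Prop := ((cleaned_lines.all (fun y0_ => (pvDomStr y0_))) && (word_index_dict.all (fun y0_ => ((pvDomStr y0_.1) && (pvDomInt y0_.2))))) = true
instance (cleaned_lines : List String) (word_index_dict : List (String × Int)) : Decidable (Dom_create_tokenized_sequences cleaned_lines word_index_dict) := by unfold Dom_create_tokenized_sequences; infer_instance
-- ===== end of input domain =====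

-- B replaces the per-n slicing tokens[:n+1] with a single incremental pass per line
-- growing one pref accumulator (alternative decomposition, same cost).

-- ===== PORT A =====
-- line_to_tokens = [word_index_dict[word] for word in line.split(' ')]
-- (lookup in the Python dict built from the pairs; Pre_ guarantees every word is a key,
--  so getD's default is never used)
def pvTokens (word_index_dict : List (String × Int)) (line : String) : List Int :=
  ((PySem.Str.split? line " ").getD []).map
    (fun w => PySem.Dict.getD (PySem.Dict.ofList word_index_dict) w 0)

def create_tokenized_sequences (cleaned_lines : List String) (word_index_dict : List (String × Int)) : List (List Int) :=
  cleaned_lines.foldl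
    (fun tokenized_sequences line =>
      let line_to_tokens := pvTokens word_index_dict line
      let num_tokens : Int := line_to_tokens.length
      (PySem.List.pyRange 1 num_tokens 1).foldl
        (fun acc n => acc ++ [PySem.List.slice line_to_tokens none (some (n + 1))])
        tokenized_sequences)
    []

-- ===== PORT B =====
-- per line: pref = tokens[:1]; for t in tokens[1:]: pref.append(t); out.append(list(pref))
def create_tokenized_sequences_alt (cleaned_lines : List String) (word_index_dict : List (String × Int)) : List (List Int) :=
  cleaned_lines.foldl
    (fun out line =>
      let tokens := pvTokens word_index_dict line
      (tokens.drop 1).foldl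
        (fun st t =>
          let pref := st.1 ++ [t]
          (pref, st.2 ++ [pref]))
        (tokens.take 1, out) |>.2)
    []

-- ===== PRECONDITION & SPEC =====
-- Pre_ excludes exactly the inputs where A raises KeyError: some word of some line's
-- split(' ') is not a key of the dict.
def Pre_create_tokenized_sequences (cleaned_lines : List String) (word_index_dict : List (String × Int)) : Prop :=
  ∀ line ∈ cleaned_lines, ∀ w ∈ (PySem.Str.split? line " ").getD [],
    (PySem.Dict.ofList word_index_dict).contains w = true
instance (cleaned_lines : List String) (word_index_dict : List (String × Int)) : Decidable (Pre_create_tokenized_sequences cleaned_lines word_index_dict) := by unfold Pre_create_tokenized_sequences; infer_instance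

def pvWitness_create_tokenized_sequences : List String × (List (String × Int)) :=
  (["a b a", "b"], [("a", 3), ("b", -1)])

def Spec_create_tokenized_sequences (cleaned_lines : List String) (word_index_dict : List (String × Int)) (out : List (List Int)) : Prop := out = create_tokenized_sequences_alt cleaned_lines word_index_dict
instance (cleaned_lines : List String) (word_index_dict : List (String × Int)) (out : List (List Int)) : Decidable (Spec_create_tokenized_sequences cleaned_lines word_index_dict out) := by unfold Spec_create_tokenized_sequences; infer_instance

-- ===== CLAIM (what is proved, stated in full; the proofs are below) =====
def Claim_equal_create_tokenized_sequences : Prop := ∀ (cleaned_lines : List String) (word_index_dict : List (String × Int)), Dom_create_tokenized_sequences cleaned_lines word_index_dict → Pre_create_tokenized_sequences cleaned_lines word_index_dict → Spec_create_tokenized_sequences cleaned_lines word_index_dict (create_tokenized_sequences cleaned_lines word_index_dict)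

-- ===== LEMMAS AND PROOFS =====

-- B's inner pass, started from pref p, appends p ++ (first i+1 tokens of rest) for each i.
lemma b_inner (rest : List Int) : ∀ (p : List Int) (acc : List (List Int)),
    (rest.foldl (fun st t => (st.1 ++ [t], st.2 ++ [st.1 ++ [t]])) (p, acc)).2
      = acc ++ (List.range rest.length).map (fun i => p ++ rest.take (i + 1)) := by
  induction rest with
  | nil => simp
  | cons t rs ih =>
    intro p acc
    simp only [List.foldl_cons, ih, List.length_cons, List.range_succ_eq_map,
      List.map_cons, List.map_map]
    simp [List.take_succ_cons, Function.comp]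

-- A's inner loop over range(1, len toks) appends the slices toks[:n+1].
lemma a_inner (toks : List Int) (acc : List (List Int)) :
    (PySem.List.pyRange 1 (toks.length : Int) 1).foldl
        (fun a n => a ++ [PySem.List.slice toks none (some (n + 1))]) acc
      = acc ++ (List.range (toks.length - 1)).map (fun i => toks.take (i + 2)) := by
  rw [PySem.List.foldl_append_singleton_eq_map, PySem.List.pyRange_one]
  congr 1
  rw [List.map_map]
  have hlen : (((toks.length : Int) - 1).toNat) = toks.length - 1 := by omega
  rw [hlen]
  apply List.map_congr_left
  intro k hk
  have h2 : ((1 : Int) + k + 1) = ((k + 2 : Nat) : Int) := by push_cast; ring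
  rw [Function.comp_apply, h2, PySem.List.slice_to toks (by positivity)]
  have h3 : ((k + 2 : Nat) : Int).toNat = k + 2 := by omega
  rw [h3]

-- the two per-line step functions agree
lemma step_eq (word_index_dict : List (String × Int)) (acc : List (List Int)) (line : String) :
    (let line_to_tokens := pvTokens word_index_dict line
     let num_tokens : Int := line_to_tokens.length
     (PySem.List.pyRange 1 num_tokens 1).foldl
       (fun a n => a ++ [PySem.List.slice line_to_tokens none (some (n + 1))]) acc)
    = ((let tokens := pvTokens word_index_dict line
       (tokens.drop 1).foldl
         (fun st t => (st.1 ++ [t], st.2 ++ [st.1 ++ [t]]))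
         (tokens.take 1, acc)).2) := by
  simp only []
  rw [a_inner, b_inner]
  congr 1
  cases h : pvTokens word_index_dict line with
  | nil => simp
  | cons t rs =>
    simp only [List.drop_succ_cons, List.drop_zero, List.take_succ_cons, List.take_zero,
      List.length_cons, Nat.add_sub_cancel]
    apply List.map_congr_left
    intro i _
    simp

lemma outer_eq (cleaned_lines : List String) (word_index_dict : List (String × Int)) :
    ∀ acc, cleaned_lines.foldl
      (fun tokenized_sequences line =>
        let line_to_tokens := pvTokens word_index_dict line
        let num_tokens : Int := line_to_tokens.length
        (PySem.List.pyRange 1 num_tokens 1).foldl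
          (fun a n => a ++ [PySem.List.slice line_to_tokens none (some (n + 1))])
          tokenized_sequences) acc
    = cleaned_lines.foldl
      (fun out line =>
        let tokens := pvTokens word_index_dict line
        (tokens.drop 1).foldl
          (fun st t => (st.1 ++ [t], st.2 ++ [st.1 ++ [t]]))
          (tokens.take 1, out) |>.2) acc := by
  induction cleaned_lines with
  | nil => intro acc; rfl
  | cons l ls ih =>
    intro acc
    simp only [List.foldl_cons]
    rw [step_eq word_index_dict acc l]
    exact ih _

-- ===== VERDICT (by name: the statement is the Claim_ definition above) =====
theorem create_tokenized_sequences_spec : Claim_equal_create_tokenized_sequences := by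
  intro cleaned_lines word_index_dict _ _
  unfold Spec_create_tokenized_sequences create_tokenized_sequences create_tokenized_sequences_alt
  exact outer_eq cleaned_lines word_index_dict []
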